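-- pv_equiv track=rewrite | github.com/ummishah/SubnetCalculator | main.py | calculateIP
-- ===== SOURCE A (Python) =====
-- def calculateIP(ip, index, n):
--     ip = ip.copy()
--     i = index[0]
--     j = index[1]
--     while i < 4:
-- 	#Project by Syed Umair Shah
--         ip[i] = list(ip[i])
--         while j < 8:
--             ip[i][j] = str(n)
--             j += 1
--         ip[i] = "".join(ip[i])
--         j = 0
--         i += 1
--     return ip
-- ===== SOURCE B (Python) =====
-- def _fill(row, bit, j):
--     return row[:j] + bit * (8 - j) + row[8:]
--
-- def calculateIP(ip, index, n):
--     out = list(ip)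
--     i0, j = index
--     bit = str(n)
--     if i0 < 4:
--         if j < 8:
--             out[i0] = _fill(out[i0], bit, j)
--         for i in range(i0 + 1, 4):
--             out[i] = _fill(out[i], bit, 0)
--     return out
-- ===== Notes on version B (the rewrite author's own statement) =====
-- stated objective: simpler
-- what changed: Replaces A's nested while loops that explode each row into a list of 1-char strings and overwrite cells one by one with a copy plus one string-slice-and-repeat assignment for the first affected row and a single range loop writing str(n)*8 to each later row.
import Mathlib
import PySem

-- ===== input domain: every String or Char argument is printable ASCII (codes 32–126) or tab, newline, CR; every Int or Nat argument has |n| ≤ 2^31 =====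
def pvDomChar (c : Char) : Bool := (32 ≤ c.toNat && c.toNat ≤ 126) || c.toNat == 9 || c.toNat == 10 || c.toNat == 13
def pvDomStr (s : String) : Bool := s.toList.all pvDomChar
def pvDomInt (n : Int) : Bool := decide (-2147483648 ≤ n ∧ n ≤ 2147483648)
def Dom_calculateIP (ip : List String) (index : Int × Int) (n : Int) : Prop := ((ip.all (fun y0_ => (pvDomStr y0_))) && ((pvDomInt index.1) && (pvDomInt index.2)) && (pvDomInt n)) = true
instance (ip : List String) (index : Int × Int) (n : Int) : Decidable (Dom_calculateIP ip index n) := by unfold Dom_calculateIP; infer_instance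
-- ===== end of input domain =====

-- B replaces A's per-character inner while loop with one slice-and-repeat assignment per row; objective: simpler.
-- A copies its list argument first, so neither program mutates the caller's list.

-- ===== PORT A =====
-- inner 'while j < 8: ip[i][j] = str(n); j += 1' on the exploded row (a list of strings, as in Python)
def pvInnerA (row : List String) (j : Int) (s : String) : List String :=
  if h : j < 8 then pvInnerA (PySem.List.pySetD row j s) (j + 1) s else row
termination_by (8 - j).toNat
decreasing_by omega

-- outer 'while i < 4' loop; 'list(ip[i])' is the list of 1-character strings, '"".join' re-assembles it
def pvOuterA (ip : List String) (i j : Int) (n : Int) : List String :=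
  if h : i < 4 then
    pvOuterA
      (PySem.List.pySetD ip i
        (PySem.Str.join ""
          (pvInnerA ((PySem.List.pyGetD ip i "").toList.map (fun c => String.ofList [c])) j
            (PySem.Int.toStr n))))
      (i + 1) 0 n
  else ip
termination_by (4 - i).toNat
decreasing_by omega

def calculateIP (ip : List String) (index : Int × Int) (n : Int) : List String :=
  pvOuterA ip index.1 index.2 n

-- ===== PORT B =====
-- _fill(row, bit, j) = row[:j] + bit*(8-j) + row[8:]; the string concatenation is performed on code-point lists (exact)
def pvFillB (row bit : String) (j : Int) : String :=
  String.ofList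
    (PySem.List.slice row.toList none (some j) ++
     PySem.List.pyRepeat bit.toList (8 - j) ++
     PySem.List.slice row.toList (some 8) none)

def calculateIP_alt (ip : List String) (index : Int × Int) (n : Int) : List String :=
  if index.1 < 4 then
    (PySem.List.pyRange (index.1 + 1) 4 1).foldl
      (fun out i => PySem.List.pySetD out i (pvFillB (PySem.List.pyGetD out i "") (PySem.Int.toStr n) 0))
      (if index.2 < 8 then
        PySem.List.pySetD ip index.1 (pvFillB (PySem.List.pyGetD ip index.1 "") (PySem.Int.toStr n) index.2)
      else ip)
  else ip

-- ===== PRECONDITION & SPEC =====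
-- Pre_ excludes negative index components, where both programs rely on Python's accidental negative-index
-- wraparound, and the short-list/short-row shapes on which A raises IndexError while writing bits.
def Pre_calculateIP (ip : List String) (index : Int × Int) (n : Int) : Prop :=
  0 ≤ index.1 ∧ 0 ≤ index.2 ∧
  (index.1 < 4 →
    4 ≤ ip.length ∧
    (index.2 < 8 → 8 ≤ (ip.getD index.1.toNat "").toList.length) ∧
    (∀ k ∈ List.range 4, index.1 < (k : Int) → 8 ≤ (ip.getD k "").toList.length))
instance (ip : List String) (index : Int × Int) (n : Int) : Decidable (Pre_calculateIP ip index n) := by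
  unfold Pre_calculateIP; infer_instance

def pvWitness_calculateIP : List String × (Int × Int) × Int :=
  (["00000000", "00000000", "00000000", "00000000"], ((1 : Int), (3 : Int)), (1 : Int))

def Spec_calculateIP (ip : List String) (index : Int × Int) (n : Int) (out : List String) : Prop := out = calculateIP_alt ip index n
instance (ip : List String) (index : Int × Int) (n : Int) (out : List String) : Decidable (Spec_calculateIP ip index n out) := by unfold Spec_calculateIP; infer_instance

-- ===== CLAIM (what is proved, stated in full; the proofs are below) =====
def Claim_equal_calculateIP : Prop := ∀ (ip : List String) (index : Int × Int) (n : Int), Dom_calculateIP ip index n → Pre_calculateIP ip index n → Spec_calculateIP ip index n (calculateIP ip index n)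

-- ===== LEMMAS AND PROOFS =====

-- two strings with the same code points are equal
theorem pv_str_ext {a b : String} (h : a.toList = b.toList) : a = b := by
  have h2 := congrArg String.ofList h
  rwa [String.ofList_toList, String.ofList_toList] at h2

-- joining with "" flattens the code points
theorem pv_chars_join_nil (ls : List (List Char)) : PySem.Chars.join [] ls = ls.flatten := by
  induction ls with
  | nil => rfl
  | cons a tl ih =>
    cases tl with
    | nil => simp [PySem.Chars.join_singleton]
    | cons b r =>
      rw [PySem.Chars.join_cons_cons, ih]
      simp

theorem pv_join_toList (parts : List String) :
    (PySem.Str.join "" parts).toList = (parts.map String.toList).flatten := by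
  rw [PySem.Str.toList_join]
  have h : ("" : String).toList = [] := rfl
  rw [h, pv_chars_join_nil]

theorem pv_flatten_sing (cs : List Char) : (cs.map (fun c => [c])).flatten = cs := by
  induction cs with
  | nil => rfl
  | cons c tl ih => simpa using ih

theorem pv_toList_comp_sing : (String.toList ∘ fun c => String.ofList [c]) = fun c => [c] := by
  funext c
  simp [String.toList_ofList]

theorem pv_join_sing (cs : List Char) :
    PySem.Str.join "" (cs.map (fun c => String.ofList [c])) = String.ofList cs := by
  apply pv_str_ext
  rw [pv_join_toList, String.toList_ofList, List.map_map, pv_toList_comp_sing, pv_flatten_sing]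

-- getD of a set at a different position
theorem pv_getD_set_ne (l : List String) (a d : String) (m k : Nat) (h : m ≠ k) :
    (l.set m a).getD k d = l.getD k d := by
  rw [List.getD_eq_getElem?_getD, List.getD_eq_getElem?_getD, List.getElem?_set_ne h]

-- the inner fill loop, on the take/replicate/drop decomposition
theorem pv_inner (bit : String) :
    ∀ (k : Nat) (cells : List String), k ≤ 8 → 8 ≤ cells.length →
      pvInnerA cells (8 - (k : Int)) bit =
        cells.take (8 - k) ++ List.replicate k bit ++ cells.drop 8 := by
  intro k
  induction k with
  | zero =>
    intro cells _ hlen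
    rw [pvInnerA]
    split
    · next hc => exact absurd hc (by omega)
    · simp
  | succ k ih =>
    intro cells hk hlen
    rw [pvInnerA]
    split
    · next hc =>
      have hnn : (0 : Int) ≤ 8 - ((k + 1 : Nat) : Int) := by omega
      rw [PySem.List.pySetD_of_nonneg _ bit hnn]
      rw [show ((8 : Int) - ((k + 1 : Nat) : Int)).toNat = 7 - k from by omega]
      rw [show (8 : Int) - ((k + 1 : Nat) : Int) + 1 = 8 - (k : Int) from by push_cast; ring]
      have hk' : k ≤ 8 := by omega
      have hlen' : 8 ≤ (cells.set (7 - k) bit).length := by simpa using hlen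
      rw [ih (cells.set (7 - k) bit) hk' hlen']
      rw [List.take_set, List.drop_set_of_lt (show 7 - k < 8 from by omega)]
      rw [List.set_eq_take_append_cons_drop]
      have hcl : 7 - k < (List.take (8 - k) cells).length := by
        simp [List.length_take]
        omega
      rw [if_pos hcl]
      have hdn : (List.take (8 - k) cells).drop (7 - k + 1) = [] := by
        apply List.drop_eq_nil_of_le
        simp [List.length_take]
        omega
      rw [hdn, List.take_take]
      rw [show min (7 - k) (8 - k) = 7 - k from by omega]
      rw [show 8 - (k + 1) = 7 - k from by omega]
      simp [List.replicate_succ]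
    · next hc => exact absurd (show (8 : Int) - ((k + 1 : Nat) : Int) < 8 from by omega) hc

-- the whole inner loop + join equals B's _fill, for 0 ≤ j < 8
theorem pv_row (bit : String) (r : String) (j : Int) (h0 : 0 ≤ j) (h8 : j < 8)
    (hl : 8 ≤ r.toList.length) :
    PySem.Str.join "" (pvInnerA (r.toList.map (fun c => String.ofList [c])) j bit) =
      pvFillB r bit j := by
  have hinner := pv_inner bit (8 - j).toNat (r.toList.map fun c => String.ofList [c])
    (by omega) (by simpa using hl)
  rw [show (8 : Int) - (((8 - j).toNat : Nat) : Int) = j from by omega] at hinner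
  rw [hinner]
  apply pv_str_ext
  rw [pv_join_toList, pvFillB, String.toList_ofList]
  rw [PySem.List.slice_to r.toList h0, PySem.List.slice_from r.toList (show (0:Int) ≤ 8 from by omega)]
  rw [List.map_append, List.map_append, List.flatten_append, List.flatten_append]
  rw [← List.map_take, ← List.map_drop, List.map_map, List.map_map, List.map_replicate]
  rw [pv_toList_comp_sing, pv_flatten_sing, pv_flatten_sing]
  rw [show 8 - (8 - j).toNat = j.toNat from by omega]
  have hrep : PySem.List.pyRepeat bit.toList (8 - j) = (List.replicate (8 - j).toNat bit.toList).flatten := rfl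
  rw [hrep]
  rw [show ((8 : Int)).toNat = 8 from rfl]

-- rows after the first: A's outer loop with j = 0 is B's range loop
theorem pv_tail (n : Int) :
    ∀ (m : Nat) (i : Int) (out : List String), i = 4 - (m : Int) → 0 ≤ i →
      (i < 4 → 4 ≤ out.length) →
      (∀ k : Nat, k < 4 → i ≤ (k : Int) → 8 ≤ (out.getD k "").toList.length) →
      pvOuterA out i 0 n =
        (PySem.List.pyRange i 4 1).foldl
          (fun o i' => PySem.List.pySetD o i' (pvFillB (PySem.List.pyGetD o i' "") (PySem.Int.toStr n) 0)) out := by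
  intro m
  induction m with
  | zero =>
    intro i out hi _ _ _
    have h4 : i = 4 := by omega
    subst h4
    rw [pvOuterA, dif_neg (show ¬ ((4 : Int) < 4) from by omega),
      PySem.List.pyRange_one_eq_nil (show (4 : Int) ≤ 4 from le_refl 4)]
    rfl
  | succ m ih =>
    intro i out hi h0 hlen hrows
    have hi4 : i < 4 := by omega
    have hlen4 := hlen hi4
    have hilen : i < (out.length : Int) := by omega
    have hrow : 8 ≤ (PySem.List.pyGetD out i "").toList.length := by
      have h := hrows i.toNat (by omega) (by omega)
      rw [List.getD_eq_getElem _ _ (by omega)] at h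
      rw [PySem.List.pyGetD_eq_getElem out "" h0 hilen]
      exact h
    rw [pvOuterA, dif_pos hi4]
    rw [PySem.List.pyRange_one_cons hi4, List.foldl_cons]
    rw [pv_row (PySem.Int.toStr n) _ 0 (le_refl 0) (by norm_num) hrow]
    apply ih (i + 1)
    · omega
    · omega
    · intro _
      rw [PySem.List.length_pySetD]
      exact hlen4
    · intro k hk hik
      rw [PySem.List.pySetD_of_nonneg _ _ h0,
        pv_getD_set_ne _ _ _ _ _ (show i.toNat ≠ k from by omega)]
      exact hrows k hk (by omega)

-- ===== VERDICT (by name: the statement is the Claim_ definition above) =====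
theorem calculateIP_spec : Claim_equal_calculateIP := by
  intro ip index n _hdom hpre
  obtain ⟨i0, j0⟩ := index
  obtain ⟨h0i, h0j, hrest⟩ := hpre
  unfold Spec_calculateIP calculateIP calculateIP_alt
  by_cases h4 : i0 < 4
  · obtain ⟨hlen, hfirst, hrows⟩ := hrest h4
    have hilen : i0 < (ip.length : Int) := by omega
    have hrows' : ∀ k : Nat, k < 4 → i0 + 1 ≤ (k : Int) → 8 ≤ (ip.getD k "").toList.length :=
      fun k hk hik => hrows k (List.mem_range.mpr hk) (by omega)
    rw [pvOuterA, dif_pos h4, if_pos h4]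
    by_cases hj : j0 < 8
    · have hrow : 8 ≤ (PySem.List.pyGetD ip i0 "").toList.length := by
        have h := hfirst hj
        rw [List.getD_eq_getElem _ _ (by omega)] at h
        rw [PySem.List.pyGetD_eq_getElem ip "" h0i hilen]
        exact h
      rw [pv_row (PySem.Int.toStr n) _ j0 h0j hj hrow, if_pos hj]
      apply pv_tail n (3 - i0).toNat (i0 + 1)
      · omega
      · omega
      · intro _
        rw [PySem.List.length_pySetD]
        exact hlen
      · intro k hk hik
        rw [PySem.List.pySetD_of_nonneg _ _ h0i,
          pv_getD_set_ne _ _ _ _ _ (show i0.toNat ≠ k from by omega)]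
        exact hrows' k hk (by omega)
    · rw [if_neg hj]
      have hinner :
          pvInnerA ((PySem.List.pyGetD ip i0 "").toList.map (fun c => String.ofList [c])) j0
            (PySem.Int.toStr n) =
          (PySem.List.pyGetD ip i0 "").toList.map (fun c => String.ofList [c]) := by
        rw [pvInnerA, dif_neg hj]
      rw [hinner, pv_join_sing, String.ofList_toList]
      have hset : PySem.List.pySetD ip i0 (PySem.List.pyGetD ip i0 "") = ip := by
        rw [PySem.List.pySetD_of_nonneg _ _ h0i,
          PySem.List.pyGetD_eq_getElem ip "" h0i hilen]
        exact List.set_getElem_self (by omega)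
      rw [hset]
      exact pv_tail n (3 - i0).toNat (i0 + 1) ip (by omega) (by omega)
        (fun _ => hlen) hrows'
  · rw [pvOuterA, dif_neg h4, if_neg h4]
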